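-- pv_equiv track=rewrite | github.com/yaeoni/algorithmStudy | programmers/17686.py | solution
-- ===== SOURCE A (Python) =====
-- def solution(files):
--     answer = []
--
--     for file in files:
--
--         head, number, tail = "", "", ""
--         flag = False
--
--         for i in range(len(file)):
--             # number에 추가
--             if file[i].isdigit() and len(number) < 5:
--                 number += file[i]
--                 flag = True
--             # 아직 number가 나오지 않았다면 header
--             elif not flag:
--                 head += file[i]
--             # 넘버가 나오고, 숫자도 아니면 나머지는 tail
--             else:
--                 tail += file[i:]
--                 break
--
--         # tuple로 저장
--         answer.append((head, number, tail))
--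
--     # sort , header->number 순으로 와! 이러니까 cmp_to_key를 쓸 필요가 없구나
--     answer.sort(key = lambda x : (x[0].upper(), int(x[1])))
--
--     return [''.join(t) for t in answer]
-- ===== SOURCE B (Python) =====
-- def solution(files):
--     # Parse by index scans + slicing instead of A's per-char flag state machine.
--     triples = []
--     for f in files:
--         i = 0
--         while i < len(f) and not f[i].isdigit():
--             i += 1
--         j = i
--         while j < len(f) and j - i < 5 and f[j].isdigit():
--             j += 1
--         triples.append((f[:i], f[i:j], f[j:]))
--     triples.sort(key=lambda t: (t[0].upper(), int(t[1])))
--     return [h + n + t for (h, n, t) in triples]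
-- ===== Notes on version B (the rewrite author's own statement) =====
-- stated objective: idiomatic
-- what changed: Replaces A's per-character flag state machine (building head/number/tail by character appends with a break) by two index scans that find the digit-run boundaries and take the three parts as slices; the stable sort with key (head.upper(), int(number)) is unchanged.
import Mathlib
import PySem

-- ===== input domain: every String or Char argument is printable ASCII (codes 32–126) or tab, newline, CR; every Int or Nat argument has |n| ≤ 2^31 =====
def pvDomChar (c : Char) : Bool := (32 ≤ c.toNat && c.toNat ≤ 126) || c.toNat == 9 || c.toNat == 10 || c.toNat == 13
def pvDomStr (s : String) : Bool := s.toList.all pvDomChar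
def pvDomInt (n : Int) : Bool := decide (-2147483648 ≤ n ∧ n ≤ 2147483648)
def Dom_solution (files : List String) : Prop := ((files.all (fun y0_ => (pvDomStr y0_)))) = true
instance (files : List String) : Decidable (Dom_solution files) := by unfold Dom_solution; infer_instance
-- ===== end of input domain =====

-- B re-implements A's per-character flag state machine by two index scans plus slicing; the
-- stable sort with key (head.upper(), int(number)) and the final join are unchanged.

-- ===== PORT A =====
-- inner 'for i in range(len(file))' loop: state (head, number, flag), remaining suffix = file[i:];
-- the 'tail += file[i:]; break' branch returns the current suffix as tail.
def solGoA : List Char → List Char → List Char → Bool → (List Char × List Char × List Char)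
  | [], head, number, _ => (head, number, [])
  | c :: cs, head, number, flag =>
    if PySem.Chars.isdigit c = true ∧ number.length < 5 then
      solGoA cs head (number ++ [c]) true
    else if !flag then
      solGoA cs (head ++ [c]) number flag
    else
      (head, number, c :: cs)

-- int(x[1]) in the sort key: total stand-in (ofChars? …).getD 0 — Pre_solution excludes the
-- inputs (a file with no digit, number = "") where Python's int('') raises ValueError.
def solution (files : List String) : List String :=
  let answer := files.foldl (fun acc file => acc ++ [solGoA file.toList [] [] false]) []
  let answer := PySem.List.sorted2 answer
    (fun t => PySem.Chars.upper t.1) (fun t => (PySem.Int.ofChars? t.2.1).getD 0) false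
  answer.map (fun t => String.ofList (t.1 ++ t.2.1 ++ t.2.2))

-- ===== PORT B =====
-- first while loop of Source B: i = number of leading non-digit characters
def scanHeadLen : List Char → Nat
  | [] => 0
  | c :: cs => if PySem.Chars.isdigit c then 0 else scanHeadLen cs + 1

-- second while loop of Source B: advance while j - i < 5 and digit (k = j - i)
def scanNumLen : List Char → Nat → Nat
  | [], _ => 0
  | c :: cs, k =>
    if k < 5 ∧ PySem.Chars.isdigit c = true then scanNumLen cs (k + 1) + 1 else 0

-- slices f[:i], f[i:j], f[j:] are take/drop on the code points (exact for slicing with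
-- 0 ≤ i ≤ j ≤ len, which holds here); int key as in port A, excluded by Pre_ where it raises.
def solution_alt (files : List String) : List String :=
  let triples := files.map (fun f =>
    let cs := f.toList
    let i := scanHeadLen cs
    let j := i + scanNumLen (cs.drop i) 0
    (cs.take i, ((cs.drop i).take (j - i), cs.drop j)))
  let sortedT := PySem.List.sorted2 triples
    (fun t => PySem.Chars.upper t.1) (fun t => (PySem.Int.ofChars? t.2.1).getD 0) false
  sortedT.map (fun t => String.ofList (t.1 ++ t.2.1 ++ t.2.2))

-- ===== PRECONDITION & SPEC =====
-- Pre_ excludes exactly the inputs where some file contains no digit: there number = '' and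
-- Python's int('') raises ValueError inside the sort key (in A and in B alike).
def Pre_solution (files : List String) : Prop :=
  ∀ f ∈ files, f.toList.any PySem.Chars.isdigit = true
instance (files : List String) : Decidable (Pre_solution files) := by
  unfold Pre_solution; infer_instance

def pvWitness_solution : List String := ["a1"]

def Spec_solution (files : List String) (out : List String) : Prop := out = solution_alt files
instance (files : List String) (out : List String) : Decidable (Spec_solution files out) := by
  unfold Spec_solution; infer_instance

-- ===== CLAIM (what is proved, stated in full; the proofs are below) =====
def Claim_equal_solution : Prop :=
  ∀ (files : List String), Dom_solution files → Pre_solution files → Spec_solution files (solution files)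

-- ===== LEMMAS AND PROOFS =====

-- B's parse of one file, as a function (the body of solution_alt's map)
def parseB (cs : List Char) : List Char × List Char × List Char :=
  let i := scanHeadLen cs
  let j := i + scanNumLen (cs.drop i) 0
  (cs.take i, ((cs.drop i).take (j - i), cs.drop j))

-- phase 2 of A's state machine (flag = true) is B's digit-run scan
lemma solGoA_true (cs : List Char) : ∀ head num : List Char,
    solGoA cs head num true =
      (head, num ++ cs.take (scanNumLen cs num.length), cs.drop (scanNumLen cs num.length)) := by
  induction cs with
  | nil => intro head num; simp [solGoA, scanNumLen]
  | cons c cs ih =>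
    intro head num
    by_cases hd : PySem.Chars.isdigit c = true
    · by_cases hl : num.length < 5
      · have : scanNumLen (c :: cs) num.length = scanNumLen cs (num.length + 1) + 1 := by
          simp [scanNumLen, hd, hl]
        rw [solGoA, if_pos ⟨hd, hl⟩, ih, this]
        simp
      · have : scanNumLen (c :: cs) num.length = 0 := by simp [scanNumLen, hd, hl]
        rw [solGoA, if_neg (by tauto), this]
        simp
    · have : scanNumLen (c :: cs) num.length = 0 := by simp [scanNumLen, hd]
      rw [solGoA, if_neg (by tauto), this]
      simp

-- phase 1 (flag = false, number still empty) accumulates B's head and hands over to phase 2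
lemma solGoA_false (cs : List Char) : ∀ head : List Char,
    solGoA cs head [] false =
      (head ++ cs.take (scanHeadLen cs),
        (cs.drop (scanHeadLen cs)).take (scanNumLen (cs.drop (scanHeadLen cs)) 0),
        (cs.drop (scanHeadLen cs)).drop (scanNumLen (cs.drop (scanHeadLen cs)) 0)) := by
  induction cs with
  | nil => intro head; simp [solGoA, scanHeadLen, scanNumLen]
  | cons c cs ih =>
    intro head
    by_cases hd : PySem.Chars.isdigit c = true
    · have h0 : scanHeadLen (c :: cs) = 0 := by simp [scanHeadLen, hd]
      have h1 : scanNumLen (c :: cs) 0 = scanNumLen cs 1 + 1 := by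
        simp [scanNumLen, hd]
      rw [solGoA, if_pos ⟨hd, by simp⟩, solGoA_true, h0]
      simp [h1]
    · have h0 : scanHeadLen (c :: cs) = scanHeadLen cs + 1 := by simp [scanHeadLen, hd]
      rw [solGoA, if_neg (by tauto)]
      simp only [Bool.not_false, if_true]
      rw [ih, h0]
      simp

-- A's per-file parse equals B's per-file parse
lemma parse_eq (cs : List Char) : solGoA cs [] [] false = parseB cs := by
  rw [solGoA_false, parseB]
  simp [List.drop_drop]

theorem solution_eq_alt (files : List String) : solution files = solution_alt files := by
  unfold solution solution_alt
  rw [PySem.List.foldl_append_singleton_eq_map]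
  have : files.map (fun file => solGoA file.toList [] [] false)
      = files.map (fun f =>
          let cs := f.toList
          let i := scanHeadLen cs
          let j := i + scanNumLen (cs.drop i) 0
          (cs.take i, ((cs.drop i).take (j - i), cs.drop j))) := by
    refine List.map_congr_left (fun f _ => ?_)
    simpa [parseB] using parse_eq f.toList
  rw [this]
  rfl

-- ===== VERDICT (by name: the statement is the Claim_ definition above) =====
theorem solution_spec : Claim_equal_solution := by
  intro files _ _
  unfold Spec_solution
  exact solution_eq_alt files
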